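-- pv_equiv track=rewrite | github.com/mahacoder/odyssey | odyssey/compare_freq_map.py | combine_frequency_map
-- ===== SOURCE A (Python) =====
-- from collections import defaultdict
--
-- def combine_frequency_map(frequency_map1, frequency_map2):
--     map = defaultdict(int)
--     for k, v in frequency_map1.items():
--         map[k] = v
--     for k, v in frequency_map2.items():
--         if k in map: map[k]+=v
--         else: map[k]=v
--     return map
-- ===== SOURCE B (Python) =====
-- from collections import defaultdict
--
-- def combine_frequency_map(frequency_map1, frequency_map2):
--     groups = {}
--     for k, v in [*frequency_map1.items(), *frequency_map2.items()]:
--         groups.setdefault(k, []).append(v)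
--     result = defaultdict(int)
--     for k, vs in groups.items():
--         result[k] = sum(vs)
--     return result
-- ===== Notes on version B (the rewrite author's own statement) =====
-- stated objective: alternative
-- what changed: Replaces A's copy-then-accumulate dict updates with a group-then-reduce scheme: one pass groups every value into a per-key list via setdefault(k, []).append(v) over the concatenated items, then a reduce pass sums each group; no in-place numeric accumulation occurs.
import Mathlib
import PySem

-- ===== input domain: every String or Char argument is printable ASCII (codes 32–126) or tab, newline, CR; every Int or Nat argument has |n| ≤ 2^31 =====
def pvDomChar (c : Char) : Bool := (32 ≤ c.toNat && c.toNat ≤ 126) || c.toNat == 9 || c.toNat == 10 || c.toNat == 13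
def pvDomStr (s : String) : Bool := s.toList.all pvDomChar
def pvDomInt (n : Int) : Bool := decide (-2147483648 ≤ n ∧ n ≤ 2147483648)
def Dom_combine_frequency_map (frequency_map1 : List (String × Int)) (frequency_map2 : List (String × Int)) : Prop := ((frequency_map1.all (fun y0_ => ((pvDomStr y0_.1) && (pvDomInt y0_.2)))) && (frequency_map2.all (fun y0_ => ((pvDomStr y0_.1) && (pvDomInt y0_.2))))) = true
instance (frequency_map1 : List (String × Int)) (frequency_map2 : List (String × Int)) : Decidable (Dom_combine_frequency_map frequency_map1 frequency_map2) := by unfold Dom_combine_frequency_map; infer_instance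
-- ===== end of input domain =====

-- B replaces A's copy-then-accumulate dict updates with group-then-reduce: it first groups
-- every value into a per-key list over the concatenated items, then sums each group
-- (objective: alternative decomposition and intermediate data structure, same cost).

-- ===== PORT A =====
def combine_frequency_map (frequency_map1 : List (String × Int)) (frequency_map2 : List (String × Int)) : List (String × Int) :=
  let map0 : PySem.Dict String Int :=
    frequency_map1.foldl (fun d kv => d.insert kv.1 kv.2) PySem.Dict.empty
  let map1 : PySem.Dict String Int :=
    frequency_map2.foldl
      (fun d kv => if d.contains kv.1 then d.modify kv.1 0 (· + kv.2) else d.insert kv.1 kv.2)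
      map0
  map1.items

-- ===== PORT B =====
-- Python's `groups.setdefault(k, []).append(v)` sets groups[k] = groups.get(k, []) + [v],
-- which is exactly `Dict.modify k [] (· ++ [v])`.
def combine_frequency_map_alt (frequency_map1 : List (String × Int)) (frequency_map2 : List (String × Int)) : List (String × Int) :=
  let groups : PySem.Dict String (List Int) :=
    (frequency_map1 ++ frequency_map2).foldl
      (fun g kv => g.modify kv.1 [] (· ++ [kv.2])) PySem.Dict.empty
  let result : PySem.Dict String Int :=
    groups.items.foldl (fun r kv => r.insert kv.1 kv.2.sum) PySem.Dict.empty
  result.items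

-- ===== PRECONDITION & SPEC =====
-- Pre_ requires each association list to have distinct keys: A's arguments are Python dicts,
-- whose items() always have distinct keys, so this excludes no input A actually accepts.
def Pre_combine_frequency_map (frequency_map1 : List (String × Int)) (frequency_map2 : List (String × Int)) : Prop :=
  (frequency_map1.map Prod.fst).Nodup ∧ (frequency_map2.map Prod.fst).Nodup
instance (frequency_map1 : List (String × Int)) (frequency_map2 : List (String × Int)) : Decidable (Pre_combine_frequency_map frequency_map1 frequency_map2) := by unfold Pre_combine_frequency_map; infer_instance
def pvWitness_combine_frequency_map : (List (String × Int)) × (List (String × Int)) :=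
  ([("a", 1), ("b", 2)], [("a", 3), ("c", 4)])

def Spec_combine_frequency_map (frequency_map1 : List (String × Int)) (frequency_map2 : List (String × Int)) (out : List (String × Int)) : Prop := out = combine_frequency_map_alt frequency_map1 frequency_map2
instance (frequency_map1 : List (String × Int)) (frequency_map2 : List (String × Int)) (out : List (String × Int)) : Decidable (Spec_combine_frequency_map frequency_map1 frequency_map2 out) := by unfold Spec_combine_frequency_map; infer_instance

-- ===== CLAIM (what is proved, stated in full; the proofs are below) =====
def Claim_equal_combine_frequency_map : Prop := ∀ (frequency_map1 : List (String × Int)) (frequency_map2 : List (String × Int)), Dom_combine_frequency_map frequency_map1 frequency_map2 → Pre_combine_frequency_map frequency_map1 frequency_map2 → Spec_combine_frequency_map frequency_map1 frequency_map2 (combine_frequency_map frequency_map1 frequency_map2)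

-- ===== LEMMAS AND PROOFS =====

-- first-match lookup in a literal dict, unfolded one pair
lemma getD_mk_cons (ak : String) (av : Int) (rest : List (String × Int)) (k : String) :
    (PySem.Dict.mk ((ak, av) :: rest)).getD k 0 =
      if ak = k then av else (PySem.Dict.mk rest).getD k 0 := by
  by_cases h : ak = k <;> simp [PySem.Dict.getD, PySem.Dict.get?_mk_cons, h]

-- lookup into a literal dict is 0 when the key is absent
lemma getD_mk_zero {l : List (String × Int)} {k : String} (h : k ∉ l.map Prod.fst) :
    (PySem.Dict.mk l).getD k 0 = 0 := by
  induction l with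
  | nil => simp [PySem.Dict.getD, PySem.Dict.get?]
  | cons a rest ih =>
    obtain ⟨ak, av⟩ := a
    simp only [List.map_cons, List.mem_cons, not_or] at h
    rw [getD_mk_cons, if_neg (Ne.symm h.1)]
    exact ih h.2

-- a plain-insert fold looked up with getD agrees with first-match lookup, for distinct keys
lemma getD_foldF {l : List (String × Int)} (hn : (l.map Prod.fst).Nodup)
    (d : PySem.Dict String Int) (k : String) :
    (l.foldl (fun d kv => d.insert kv.1 kv.2) d).getD k 0 =
      if k ∈ l.map Prod.fst then (PySem.Dict.mk l).getD k 0 else d.getD k 0 := by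
  induction l generalizing d with
  | nil => simp
  | cons a rest ih =>
    obtain ⟨ak, av⟩ := a
    simp only [List.map_cons, List.nodup_cons] at hn
    rw [List.foldl_cons, ih hn.2, getD_mk_cons]
    simp only [List.map_cons, List.mem_cons]
    by_cases hr : k ∈ rest.map Prod.fst
    · have hka : k ≠ ak := fun h => hn.1 (h ▸ hr)
      rw [if_pos hr, if_pos (Or.inr hr), if_neg (Ne.symm hka)]
    · by_cases hk : k = ak
      · subst hk
        rw [if_neg hr, if_pos (Or.inl rfl), if_pos rfl, PySem.Dict.getD_insert_self]
      · rw [if_neg hr, if_neg (by simp [hk, hr]), PySem.Dict.getD_insert_of_ne _ _ _ hk]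

-- the accumulate fold adds the first-match lookup of l, for distinct keys of l
lemma getD_foldG {l : List (String × Int)} (hn : (l.map Prod.fst).Nodup)
    (d : PySem.Dict String Int) (k : String) :
    (l.foldl (fun d kv => d.insert kv.1 (d.getD kv.1 0 + kv.2)) d).getD k 0 =
      d.getD k 0 + (PySem.Dict.mk l).getD k 0 := by
  induction l generalizing d with
  | nil => simp [PySem.Dict.getD, PySem.Dict.get?]
  | cons a rest ih =>
    obtain ⟨ak, av⟩ := a
    simp only [List.map_cons, List.nodup_cons] at hn
    rw [List.foldl_cons, ih hn.2, getD_mk_cons]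
    by_cases hk : k = ak
    · subst hk
      rw [PySem.Dict.getD_insert_self, getD_mk_zero hn.1, if_pos rfl]
      ring
    · rw [PySem.Dict.getD_insert_of_ne _ _ _ hk, if_neg (Ne.symm hk)]

-- A's second loop body is exactly an insert of (old value + v)
lemma stepA_eq :
    (fun (d : PySem.Dict String Int) (kv : String × Int) =>
        if d.contains kv.1 then d.modify kv.1 0 (· + kv.2) else d.insert kv.1 kv.2) =
      (fun d kv => d.insert kv.1 (d.getD kv.1 0 + kv.2)) := by
  funext d kv
  by_cases h : d.contains kv.1
  · simp [h, PySem.Dict.modify]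
  · simp only [h, Bool.false_eq_true, if_false]
    rw [PySem.Dict.getD_of_not_contains _ _ (by simpa using h), Int.zero_add]

-- the sum of one list's values grouped at key k is its first-match lookup, for distinct keys
lemma sum_filter_eq_getD {l : List (String × Int)} (hn : (l.map Prod.fst).Nodup) (k : String) :
    ((l.filter (fun kv => kv.1 == k)).map Prod.snd).sum = (PySem.Dict.mk l).getD k 0 := by
  induction l with
  | nil => simp [PySem.Dict.getD, PySem.Dict.get?]
  | cons a rest ih =>
    obtain ⟨ak, av⟩ := a
    simp only [List.map_cons, List.nodup_cons] at hn
    rw [getD_mk_cons]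
    by_cases h : ak = k
    · subst h
      have hrest : rest.filter (fun kv => kv.1 == ak) = [] := by
        refine List.filter_eq_nil_iff.mpr (fun kv hkv => ?_)
        simp only [beq_iff_eq]
        exact fun he => hn.1 (he ▸ List.mem_map_of_mem hkv)
      simp [hrest]
    · simp only [List.filter_cons, beq_iff_eq, h, if_false]
      exact ih hn.2

-- ===== VERDICT (by name: the statement is the Claim_ definition above) =====
theorem combine_frequency_map_spec : Claim_equal_combine_frequency_map := by
  intro m1 m2 _ hpre
  obtain ⟨hn1, hn2⟩ := hpre
  unfold Spec_combine_frequency_map combine_frequency_map combine_frequency_map_alt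
  simp only [stepA_eq]
  set d0 : PySem.Dict String Int := m1.foldl (fun d kv => d.insert kv.1 kv.2) PySem.Dict.empty with hd0
  set dA : PySem.Dict String Int :=
    m2.foldl (fun d kv => d.insert kv.1 (d.getD kv.1 0 + kv.2)) d0 with hdA
  set gs : PySem.Dict String (List Int) :=
    (m1 ++ m2).foldl (fun g kv => g.modify kv.1 [] (· ++ [kv.2])) PySem.Dict.empty with hgs
  have hkdA : dA.keys = PySem.Set.ofList ((m1 ++ m2).map Prod.fst) := by
    rw [hdA, PySem.Dict.keys_foldl_insert_key, hd0, PySem.Dict.keys_foldl_insert_key,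
      PySem.Dict.keys_empty, PySem.Set.update_nil_left, List.map_append, PySem.Set.ofList_append]
  have hkg : gs.keys = PySem.Set.ofList ((m1 ++ m2).map Prod.fst) := by
    rw [hgs, PySem.Dict.keys_foldl_modify_key, PySem.Dict.keys_empty, PySem.Set.update_nil_left]
  have hnd0 : d0.keys.Nodup := by
    rw [hd0]; exact PySem.Dict.nodup_keys_foldl_insert_key _ _ _ _ (by simp)
  have hndA : dA.keys.Nodup := by
    rw [hdA]; exact PySem.Dict.nodup_keys_foldl_insert_key _ _ _ _ hnd0
  have hndg : gs.keys.Nodup := by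
    rw [hgs]; exact PySem.Dict.nodup_keys_foldl_modify_key _ _ _ _ _ (by simp)
  -- pointwise values of dA
  have hval : ∀ k, dA.getD k 0 = (PySem.Dict.mk m1).getD k 0 + (PySem.Dict.mk m2).getD k 0 := by
    intro k
    rw [hdA, getD_foldG hn2]
    congr 1
    rw [hd0, getD_foldF hn1]
    by_cases hk : k ∈ m1.map Prod.fst
    · rw [if_pos hk]
    · rw [if_neg hk, getD_mk_zero hk]
      simp [PySem.Dict.getD, PySem.Dict.get?, PySem.Dict.empty]
  -- pointwise groups
  have hgval : ∀ k, gs.getD k [] = ((m1 ++ m2).filter (fun kv => kv.1 == k)).map Prod.snd := by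
    intro k
    rw [hgs, PySem.Dict.getD_foldl_modify_append]
    simp [PySem.Dict.getD, PySem.Dict.get?, PySem.Dict.empty]
  -- B's result: the reduce pass over groups' items
  rw [PySem.Dict.items_eq_map_keys gs hndg ([] : List Int),
    PySem.Dict.items_foldl_insert_fresh (gs.keys.map (fun k => (k, gs.getD k []))) Prod.fst
      (fun kv => kv.2.sum) PySem.Dict.empty (fun a _ => by simp)
      (by simpa [List.map_map, Function.comp_def] using hndg),
    PySem.Dict.items_eq_map_keys dA hndA 0, hkdA, ← hkg]
  simp only [PySem.Dict.empty, List.nil_append, List.map_map, Function.comp_def]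
  refine List.map_congr_left (fun k _ => ?_)
  rw [hval k, hgval k, List.filter_append, List.map_append, List.sum_append,
    sum_filter_eq_getD hn1, sum_filter_eq_getD hn2]
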